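-- pv_equiv track=rewrite | github.com/NightFeather0615/Genshin-MIDI-Auto-Player | main.py | shift_note_range
-- ===== SOURCE A (Python) =====
-- note_shift = [
--   0, 2, 2, 1, 2, 2, 2,
--   1, 2, 2, 1, 2, 2, 2,
--   1, 2, 2, 1, 2, 2, 2
-- ]
--
-- note_keys = [
--   "z", "x", "c", "v", "b", "n", "m",
--   "a", "s", "d", "f", "g", "h", "j",
--   "q", "w", "e", "r", "t", "y", "u"
-- ]
--
-- def shift_note_range(base):
--   current_note = {}
--   index = 0
--   for shift in note_shift:
--     base += shift
--     current_note[base] = note_keys[index]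
--     index += 1
--   return current_note
-- ===== SOURCE B (Python) =====
-- note_shift = [
--   0, 2, 2, 1, 2, 2, 2,
--   1, 2, 2, 1, 2, 2, 2,
--   1, 2, 2, 1, 2, 2, 2
-- ]
--
-- note_keys = [
--   "z", "x", "c", "v", "b", "n", "m",
--   "a", "s", "d", "f", "g", "h", "j",
--   "q", "w", "e", "r", "t", "y", "u"
-- ]
--
-- # Precomputed prefix-sum offset table: absolute position of each key relative to base.
-- note_offsets = [sum(note_shift[:i + 1]) for i in range(len(note_shift))]
--
-- def shift_note_range(base):
--   return {base + off: key for off, key in zip(note_offsets, note_keys)}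
-- ===== Notes on version B (the rewrite author's own statement) =====
-- stated objective: simpler
-- what changed: B replaces A's single loop threading a mutating base accumulator and a manual index counter with a module-level prefix-sum offset table and a one-line dict comprehension zipping offsets with keys.
import Mathlib
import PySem

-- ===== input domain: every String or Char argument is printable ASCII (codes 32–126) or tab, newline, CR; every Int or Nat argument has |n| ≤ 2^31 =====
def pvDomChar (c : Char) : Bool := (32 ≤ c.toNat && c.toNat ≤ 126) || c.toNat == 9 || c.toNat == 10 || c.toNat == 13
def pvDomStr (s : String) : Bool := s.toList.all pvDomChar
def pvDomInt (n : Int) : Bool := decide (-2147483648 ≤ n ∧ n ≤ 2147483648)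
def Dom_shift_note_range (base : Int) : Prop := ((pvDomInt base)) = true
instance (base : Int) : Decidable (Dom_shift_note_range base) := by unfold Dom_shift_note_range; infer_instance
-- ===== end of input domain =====

-- B builds the dict from a precomputed prefix-sum offset table zipped with the keys,
-- instead of A's loop threading a mutating base accumulator and a manual index counter (objective: simpler).

-- ===== PORT A =====
def noteShift : List Int := [0,2,2,1,2,2,2,1,2,2,1,2,2,2,1,2,2,1,2,2,2]
def noteKeys : List String := ["z","x","c","v","b","n","m","a","s","d","f","g","h","j","q","w","e","r","t","y","u"]

-- state = (current_note, index, base); note_keys[index] is always in range (index runs 0..20),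
-- so pyGetD with a dummy default is exact here
def shift_note_range (base : Int) : List (Int × String) :=
  let st := noteShift.foldl
    (fun (st : PySem.Dict Int String × Int × Int) shift =>
      let b := st.2.2 + shift
      (st.1.insert b (PySem.List.pyGetD noteKeys st.2.1 ""), st.2.1 + 1, b))
    (PySem.Dict.empty, 0, base)
  st.1.items

-- ===== PORT B =====
-- note_offsets = [sum(note_shift[:i+1]) for i in range(len(note_shift))]
def noteOffsets : List Int :=
  (PySem.List.pyRange 0 (PySem.List.len noteShift) 1).map
    (fun i => (PySem.List.slice noteShift none (some (i + 1))).sum)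

-- {base + off: key for off, key in zip(note_offsets, note_keys)}
def shift_note_range_alt (base : Int) : List (Int × String) :=
  ((noteOffsets.zip noteKeys).foldl
    (fun (d : PySem.Dict Int String) p => d.insert (base + p.1) p.2) PySem.Dict.empty).items

-- ===== PRECONDITION & SPEC =====
def Spec_shift_note_range (base : Int) (out : List (Int × String)) : Prop := out = shift_note_range_alt base
instance (base : Int) (out : List (Int × String)) : Decidable (Spec_shift_note_range base out) := by unfold Spec_shift_note_range; infer_instance

-- ===== CLAIM (what is proved, stated in full; the proofs are below) =====
def Claim_equal_shift_note_range : Prop := ∀ (base : Int), Dom_shift_note_range base → Spec_shift_note_range base (shift_note_range base)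

-- ===== LEMMAS AND PROOFS =====
theorem noteOffsets_eval :
    noteOffsets = [0,2,4,5,7,9,11,12,14,16,17,19,21,23,24,26,28,29,31,33,35] := by decide

-- ===== VERDICT (by name: the statement is the Claim_ definition above) =====
theorem shift_note_range_spec : Claim_equal_shift_note_range := by
  intro base _
  unfold Spec_shift_note_range
  simp [shift_note_range, shift_note_range_alt, noteShift, noteKeys, noteOffsets_eval,
    PySem.Dict.insert, PySem.Dict.contains, PySem.List.pyGetD, PySem.List.pyGet?, PySem.List.pyIdx?,
    add_assoc, PySem.Dict.empty, beq_iff_eq, add_right_inj]
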